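-- pv_equiv track=rewrite | github.com/sukrisvong/advent-of-code | 2024/working_code/day17/part2.py | calculate_initial_a
-- ===== SOURCE A (Python) =====
-- def calculate_initial_a(coefficients, potential_coefficient, coefficient_index):
--     initial_a = 0
--     for n in range(len(coefficients)):
--         if n == coefficient_index:
--             initial_a += potential_coefficient * 8 **n
--         else:
--             if coefficients[n] == []:
--                 continue
--             initial_a += coefficients[n][0] * 8**n
--     return initial_a
-- ===== SOURCE B (Python) =====
-- def calculate_initial_a(coefficients, potential_coefficient, coefficient_index):
--     # Horner's method over the rows themselves, highest position first:
--     # no 8**n powers, no indexing into coefficients.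
--     result = 0
--     n = len(coefficients)
--     for row in reversed(coefficients):
--         n = n - 1
--         digit = potential_coefficient if n == coefficient_index else (row[0] if row else 0)
--         result = result * 8 + digit
--     return result
-- ===== Notes on version B (the rewrite author's own statement) =====
-- stated objective: alternative
-- what changed: Replaces the low-to-high indexed sum of explicit 8**n powers with Horner's method iterating over the rows themselves in reverse (result = result*8 + digit with a decrementing counter), so there is no range/indexing and no power computation.
import Mathlib
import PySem

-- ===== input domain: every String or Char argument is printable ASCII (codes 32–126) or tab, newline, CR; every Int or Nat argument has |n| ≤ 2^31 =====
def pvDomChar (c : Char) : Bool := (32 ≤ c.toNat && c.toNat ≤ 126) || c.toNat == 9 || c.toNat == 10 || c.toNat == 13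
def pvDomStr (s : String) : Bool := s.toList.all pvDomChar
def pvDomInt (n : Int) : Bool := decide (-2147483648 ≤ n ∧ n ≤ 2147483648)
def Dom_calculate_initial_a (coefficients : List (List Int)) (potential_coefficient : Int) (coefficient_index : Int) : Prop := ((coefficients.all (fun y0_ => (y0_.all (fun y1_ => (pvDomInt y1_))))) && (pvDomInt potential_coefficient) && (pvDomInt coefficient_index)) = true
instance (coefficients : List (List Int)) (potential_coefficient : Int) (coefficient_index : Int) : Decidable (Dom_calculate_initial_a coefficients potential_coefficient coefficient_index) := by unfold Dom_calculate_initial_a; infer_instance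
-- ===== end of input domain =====

-- B replaces A's low-to-high indexed sum of explicit 8^n powers with Horner's method iterating over the reversed row list itself (result = result*8 + digit, decrementing counter); objective: alternative algorithm of the same cost.


-- ===== PORT A =====
-- for n in range(len(coefficients)): low-to-high, adding term * 8**n (skip empty rows)
def calculate_initial_a (coefficients : List (List Int)) (potential_coefficient : Int) (coefficient_index : Int) : Int :=
  (List.range coefficients.length).foldl
    (fun (initial_a : Int) (n : Nat) =>
      if (n : Int) = coefficient_index then
        initial_a + potential_coefficient * 8 ^ n
      else
        match coefficients.getD n [] with
        | [] => initial_a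
        | x :: _ => initial_a + x * 8 ^ n)
    0

-- ===== PORT B =====
-- for row in reversed(coefficients): n = n - 1; result = result*8 + digit   (state = (result, n))
def calculate_initial_a_alt (coefficients : List (List Int)) (potential_coefficient : Int) (coefficient_index : Int) : Int :=
  (coefficients.reverse.foldl
    (fun (st : Int × Int) (row : List Int) =>
      let n := st.2 - 1
      let digit := if n = coefficient_index then potential_coefficient
                   else match row with | [] => 0 | x :: _ => x
      (st.1 * 8 + digit, n))
    (0, (coefficients.length : Int))).1

-- ===== PRECONDITION & SPEC =====
def Spec_calculate_initial_a (coefficients : List (List Int)) (potential_coefficient : Int) (coefficient_index : Int) (out : Int) : Prop := out = calculate_initial_a_alt coefficients potential_coefficient coefficient_index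
instance (coefficients : List (List Int)) (potential_coefficient : Int) (coefficient_index : Int) (out : Int) : Decidable (Spec_calculate_initial_a coefficients potential_coefficient coefficient_index out) := by unfold Spec_calculate_initial_a; infer_instance

-- ===== CLAIM (what is proved, stated in full; the proofs are below) =====
def Claim_equal_calculate_initial_a : Prop := ∀ (coefficients : List (List Int)) (potential_coefficient : Int) (coefficient_index : Int), Dom_calculate_initial_a coefficients potential_coefficient coefficient_index → Spec_calculate_initial_a coefficients potential_coefficient coefficient_index (calculate_initial_a coefficients potential_coefficient coefficient_index)

-- ===== LEMMAS AND PROOFS =====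

-- the digit both programs select for position i whose row contents are `row`
def pvD (pc ci : Int) (i : Int) (row : List Int) : Int :=
  if i = ci then pc else match row with | [] => 0 | x :: _ => x

-- common recursive spec: the value of a list of rows whose head sits at position i
def pvG (pc ci : Int) : List (List Int) → Int → Int
  | [], _ => 0
  | h :: t, i => pvD pc ci i h + 8 * pvG pc ci t (i + 1)

theorem pv_foldl_congr {α β : Type} (f g : α → β → α) (l : List β) (a : α)
    (h : ∀ acc x, f acc x = g acc x) : l.foldl f a = l.foldl g a := by
  induction l generalizing a with
  | nil => rfl
  | cons b t ih => simp only [List.foldl_cons]; rw [h, ih]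

theorem pv_foldl_shift (g : Nat → Int) (l : List Nat) (a : Int) :
    l.foldl (fun acc k => acc + g k) a = a + l.foldl (fun acc k => acc + g k) 0 := by
  induction l generalizing a with
  | nil => simp
  | cons h t ih => simp only [List.foldl_cons]; rw [ih, ih (0 + g h)]; ring

theorem pv_foldl_mul (g : Nat → Int) (c : Int) (l : List Nat) :
    l.foldl (fun acc k => acc + c * g k) 0 = c * l.foldl (fun acc k => acc + g k) 0 := by
  induction l with
  | nil => simp
  | cons h t ih =>
      simp only [List.foldl_cons]
      rw [pv_foldl_shift (fun k => c * g k), pv_foldl_shift g, ih]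
      ring

theorem pv_A_gen (pc ci : Int) (L : List (List Int)) (m : Int) :
    (List.range L.length).foldl
        (fun (acc : Int) (k : Nat) => acc + pvD pc ci (m + (k : Int)) (L.getD k []) * 8 ^ k) 0
      = pvG pc ci L m := by
  induction L generalizing m with
  | nil => simp [pvG]
  | cons h t ih =>
      rw [show (h :: t).length = t.length + 1 from rfl, List.range_succ_eq_map,
        List.foldl_cons, List.foldl_map]
      rw [pv_foldl_congr _
        (fun (acc : Int) (k : Nat) => acc + 8 * (pvD pc ci ((m + 1) + (k : Int)) (t.getD k []) * 8 ^ k))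
        _ _
        (by
          intro acc k
          have h1 : (h :: t).getD (Nat.succ k) [] = t.getD k [] := rfl
          have h2 : (m + ((Nat.succ k : Nat) : Int)) = (m + 1) + (k : Int) := by push_cast; ring
          rw [h1, h2, pow_succ]
          ring)]
      rw [pv_foldl_shift (fun k => 8 * (pvD pc ci ((m + 1) + (k : Int)) (t.getD k []) * 8 ^ k)),
        pv_foldl_mul (fun k => pvD pc ci ((m + 1) + (k : Int)) (t.getD k []) * 8 ^ k), ih]
      simp only [List.getD_cons_zero, Nat.cast_zero, add_zero, pow_zero, mul_one, zero_add, pvG]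

theorem pv_A_eq_G (coefficients : List (List Int)) (pc ci : Int) :
    calculate_initial_a coefficients pc ci = pvG pc ci coefficients 0 := by
  unfold calculate_initial_a
  rw [← pv_A_gen pc ci coefficients 0]
  apply pv_foldl_congr
  intro acc n
  simp only [pvD, zero_add]
  split_ifs with hn
  · rfl
  · cases coefficients.getD n [] with
    | nil => simp
    | cons x xs => rfl

theorem pv_B_gen (pc ci : Int) (L : List (List Int)) (a m : Int) :
    L.reverse.foldl
        (fun (st : Int × Int) (row : List Int) =>
          let n := st.2 - 1
          let digit := if n = ci then pc else match row with | [] => 0 | x :: _ => x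
          (st.1 * 8 + digit, n))
        (a, m)
      = (a * 8 ^ L.length + pvG pc ci L (m - L.length), m - L.length) := by
  induction L generalizing a m with
  | nil => simp [pvG]
  | cons h t ih =>
      rw [List.reverse_cons, List.foldl_append, ih]
      simp only [List.foldl_cons, List.foldl_nil, pvG, pvD, List.length_cons,
        Nat.cast_add, Nat.cast_one]
      have e1 : m - ((t.length : Int) + 1) = m - (t.length : Int) - 1 := by ring
      have e3 : m - (t.length : Int) - 1 + 1 = m - (t.length : Int) := by ring
      rw [Prod.mk.injEq]
      simp only [e1, e3]
      refine ⟨?_, trivial⟩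
      split_ifs with hc
      · ring
      · cases h <;> ring

theorem pv_B_eq_G (coefficients : List (List Int)) (pc ci : Int) :
    calculate_initial_a_alt coefficients pc ci = pvG pc ci coefficients 0 := by
  unfold calculate_initial_a_alt
  rw [pv_B_gen]
  simp

-- ===== VERDICT (by name: the statement is the Claim_ definition above) =====
theorem calculate_initial_a_spec : Claim_equal_calculate_initial_a := by
  intro coefficients pc ci _
  unfold Spec_calculate_initial_a
  rw [pv_A_eq_G, pv_B_eq_G]
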